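-- pv_equiv track=rewrite | github.com/qanastek/EasyMCDM | EasyMCDM/Promethee.py | check_consistency_dict
-- ===== SOURCE A (Python) =====
-- def check_consistency_dict(m):
--
--     previous_lenght = -1
--
--     for s in m:
--
--         current = len(m[s])
--
--         if previous_lenght == -1:
--             previous_lenght = current
--         elif previous_lenght != current:
--             return False
--
--     return True
-- ===== SOURCE B (Python) =====
-- def check_consistency_dict(m):
--     lengths = {len(m[s]) for s in m}
--     return len(lengths) <= 1
-- ===== Notes on version B (the rewrite author's own statement) =====
-- stated objective: idiomatic
-- what changed: B materializes the set of distinct value-lengths with a set comprehension and returns whether its cardinality is at most 1, instead of A's running-sentinel loop with pairwise comparison and early exit.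
import Mathlib
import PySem

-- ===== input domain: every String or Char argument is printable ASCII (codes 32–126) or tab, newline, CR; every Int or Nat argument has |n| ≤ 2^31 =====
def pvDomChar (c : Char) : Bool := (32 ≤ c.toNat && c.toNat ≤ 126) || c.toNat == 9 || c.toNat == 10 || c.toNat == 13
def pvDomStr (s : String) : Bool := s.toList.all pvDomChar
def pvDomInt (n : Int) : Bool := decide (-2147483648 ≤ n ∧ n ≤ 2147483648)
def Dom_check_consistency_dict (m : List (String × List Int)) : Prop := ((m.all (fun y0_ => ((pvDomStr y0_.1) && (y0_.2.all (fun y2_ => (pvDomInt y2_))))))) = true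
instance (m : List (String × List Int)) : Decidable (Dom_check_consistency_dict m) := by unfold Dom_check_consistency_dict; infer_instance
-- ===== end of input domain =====

-- B checks the cardinality of the set of distinct value-lengths instead of A's
-- running-sentinel early-exit loop (objective: more idiomatic; same cost).

-- ===== PORT A =====
-- 'for s in m: current = len(m[s])' — dict keys are unique, so m[s] is exactly the
-- current entry's value; the loop carries the sentinel previous_lenght (-1 = unset).
def ccdLoop : Int → List (String × List Int) → Bool
  | _, [] => true
  | prev, (_, v) :: rest =>
    let current : Int := v.length
    if prev = -1 then ccdLoop current rest
    else if prev ≠ current then false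
    else ccdLoop prev rest

def check_consistency_dict (m : List (String × List Int)) : Bool :=
  ccdLoop (-1) m

-- ===== PORT B =====
-- lengths = {len(m[s]) for s in m}; return len(lengths) <= 1
def check_consistency_dict_alt (m : List (String × List Int)) : Bool :=
  let lengths : PySem.Set Int := PySem.Set.ofList (m.map (fun p => ((p.2.length : Int))))
  decide (PySem.Set.len lengths ≤ 1)

-- ===== PRECONDITION & SPEC =====
def Spec_check_consistency_dict (m : List (String × List Int)) (out : Bool) : Prop := out = check_consistency_dict_alt m
instance (m : List (String × List Int)) (out : Bool) : Decidable (Spec_check_consistency_dict m out) := by unfold Spec_check_consistency_dict; infer_instance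

-- ===== CLAIM (what is proved, stated in full; the proofs are below) =====
def Claim_equal_check_consistency_dict : Prop := ∀ (m : List (String × List Int)), Dom_check_consistency_dict m → Spec_check_consistency_dict m (check_consistency_dict m)

-- ===== LEMMAS AND PROOFS =====

-- Once the sentinel is set to an actual (nonnegative) length c, A's loop
-- succeeds iff every remaining value has length c.
theorem ccdLoop_set (rest : List (String × List Int)) (c : Nat) :
    ccdLoop (c : Int) rest = decide (∀ p ∈ rest, p.2.length = c) := by
  induction rest with
  | nil => simp [ccdLoop]
  | cons hd tl ih =>
    simp only [ccdLoop]
    have hne : (c : Int) ≠ -1 := by omega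
    by_cases h : (c : Int) = (hd.2.length : Int)
    · have hc : hd.2.length = c := by omega
      subst hc
      simp [hne, ih]
    · have hc : hd.2.length ≠ c := by omega
      simp [hne, h, hc]

-- A one-or-zero element list: any member equals any other member.
theorem len_le_one_mem {α : Type} {l : List α} (h : l.length ≤ 1)
    {x y : α} (hx : x ∈ l) (hy : y ∈ l) : x = y := by
  match l, h with
  | [], _ => cases hx
  | [z], _ =>
    simp only [List.mem_singleton] at hx hy
    rw [hx, hy]

-- set(a :: l) has at most one element iff every element of l equals a.
theorem ofList_cons_len_le_one (a : Int) (l : List Int) :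
    (PySem.Set.ofList (a :: l)).length ≤ 1 ↔ ∀ x ∈ l, x = a := by
  constructor
  · intro h x hx
    have hxm : x ∈ PySem.Set.ofList (a :: l) := by
      rw [PySem.Set.mem_ofList]; exact List.mem_cons_of_mem _ hx
    have ham : a ∈ PySem.Set.ofList (a :: l) := by
      rw [PySem.Set.mem_ofList]; exact List.mem_cons_self
    exact len_le_one_mem h hxm ham
  · intro h
    have : PySem.Set.ofList (a :: l) = [a] := by
      have step : ∀ l' : List Int, (∀ x ∈ l', x = a) →
          l'.foldl PySem.Set.add [a] = [a] := by
        intro l'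
        induction l' with
        | nil => intro _; rfl
        | cons hd tl ih =>
          intro hall
          have hhd : hd = a := hall hd List.mem_cons_self
          have : PySem.Set.add [a] hd = [a] := by
            rw [hhd]; simp [PySem.Set.add, PySem.Set.contains]
          simp only [List.foldl_cons, this]
          exact ih (fun x hx => hall x (List.mem_cons_of_mem _ hx))
      rw [PySem.Set.ofList_eq_foldl]
      simpa [PySem.Set.add, PySem.Set.contains] using step l h
    rw [this]
    simp

-- ===== VERDICT (by name: the statement is the Claim_ definition above) =====
theorem check_consistency_dict_spec : Claim_equal_check_consistency_dict := by
  intro m _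
  unfold Spec_check_consistency_dict check_consistency_dict check_consistency_dict_alt
  cases m with
  | nil => rfl
  | cons hd tl =>
    simp only [ccdLoop, List.map_cons, if_true]
    rw [ccdLoop_set, decide_eq_decide]
    have h := ofList_cons_len_le_one ((hd.2.length : Int)) (tl.map (fun p => ((p.2.length : Int))))
    rw [List.forall_mem_map] at h
    simp only [Nat.cast_inj] at h
    rw [← h]
    simp [PySem.Set.len]
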